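-- pv_equiv track=rewrite | github.com/jonathonreilly/toy-physics | scripts/frontier_s3_general_r.py | vertex_link
-- ===== SOURCE A (Python) =====
-- def vertex_link(v: tuple, sites: set) -> tuple[list, list, list]:
--     """
--     Compute link of vertex v in cubical complex.
--     Returns (link_verts_as_dirs, link_edges, link_triangles).
--     """
--     x, y, z = v
--     axis_dirs = [(1, 0, 0), (-1, 0, 0), (0, 1, 0), (0, -1, 0),
--                  (0, 0, 1), (0, 0, -1)]
--     link_verts = [d for d in axis_dirs
--                   if (x + d[0], y + d[1], z + d[2]) in sites]
--
--     link_edges = []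
--     for i, d1 in enumerate(link_verts):
--         for j, d2 in enumerate(link_verts):
--             if j <= i:
--                 continue
--             if sum(d1[k] * d2[k] for k in range(3)) != 0:
--                 continue
--             corner = (x + d1[0] + d2[0], y + d1[1] + d2[1],
--                       z + d1[2] + d2[2])
--             if corner in sites:
--                 link_edges.append((i, j))
--
--     link_tris = []
--     for i, d1 in enumerate(link_verts):
--         for j, d2 in enumerate(link_verts):
--             if j <= i:
--                 continue
--             for k, d3 in enumerate(link_verts):
--                 if k <= j:
--                     continue
--                 dot12 = sum(d1[l] * d2[l] for l in range(3))
--                 dot13 = sum(d1[l] * d3[l] for l in range(3))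
--                 dot23 = sum(d2[l] * d3[l] for l in range(3))
--                 if dot12 != 0 or dot13 != 0 or dot23 != 0:
--                     continue
--                 pts = [
--                     (x + d1[0], y + d1[1], z + d1[2]),
--                     (x + d2[0], y + d2[1], z + d2[2]),
--                     (x + d3[0], y + d3[1], z + d3[2]),
--                     (x + d1[0] + d2[0], y + d1[1] + d2[1],
--                      z + d1[2] + d2[2]),
--                     (x + d1[0] + d3[0], y + d1[1] + d3[1],
--                      z + d1[2] + d3[2]),
--                     (x + d2[0] + d3[0], y + d2[1] + d3[1],
--                      z + d2[2] + d3[2]),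
--                     (x + d1[0] + d2[0] + d3[0],
--                      y + d1[1] + d2[1] + d3[1],
--                      z + d1[2] + d2[2] + d3[2]),
--                 ]
--                 if all(p in sites for p in pts):
--                     link_tris.append((i, j, k))
--
--     return link_verts, link_edges, link_tris
-- ===== SOURCE B (Python) =====
-- def vertex_link(v: tuple, sites: set) -> tuple[list, list, list]:
--     """Same result as A: link vertices/edges/triangles of v, but triangles
--     reuse the accepted-edge set instead of recomputing dot products and
--     pairwise corners."""
--     x, y, z = v
--     axis_dirs = [(1, 0, 0), (-1, 0, 0), (0, 1, 0), (0, -1, 0),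
--                  (0, 0, 1), (0, 0, -1)]
--     link_verts = [d for d in axis_dirs
--                   if (x + d[0], y + d[1], z + d[2]) in sites]
--     n = len(link_verts)
--
--     link_edges = []
--     for i in range(n):
--         d1 = link_verts[i]
--         for j in range(i + 1, n):
--             d2 = link_verts[j]
--             if (d1[0] * d2[0] + d1[1] * d2[1] + d1[2] * d2[2] == 0
--                     and (x + d1[0] + d2[0], y + d1[1] + d2[1],
--                          z + d1[2] + d2[2]) in sites):
--                 link_edges.append((i, j))
--
--     E = set(link_edges)
--     link_tris = []
--     for i in range(n):
--         for j in range(i + 1, n):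
--             if (i, j) not in E:
--                 continue
--             for k in range(j + 1, n):
--                 if ((i, k) in E and (j, k) in E
--                         and (x + link_verts[i][0] + link_verts[j][0] + link_verts[k][0],
--                              y + link_verts[i][1] + link_verts[j][1] + link_verts[k][1],
--                              z + link_verts[i][2] + link_verts[j][2] + link_verts[k][2]) in sites):
--                     link_tris.append((i, j, k))
--
--     return link_verts, link_edges, link_tris
-- ===== Notes on version B (the rewrite author's own statement) =====
-- stated objective: alternative
-- what changed: Edges are built by index loops over i<j pairs and cached in a set; triangles are then decided by three lookups in that edge set plus one triple-corner membership test (using that single-direction link points are always in sites), instead of recomputing the three dot products and the three pairwise corners per triple.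
import Mathlib
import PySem

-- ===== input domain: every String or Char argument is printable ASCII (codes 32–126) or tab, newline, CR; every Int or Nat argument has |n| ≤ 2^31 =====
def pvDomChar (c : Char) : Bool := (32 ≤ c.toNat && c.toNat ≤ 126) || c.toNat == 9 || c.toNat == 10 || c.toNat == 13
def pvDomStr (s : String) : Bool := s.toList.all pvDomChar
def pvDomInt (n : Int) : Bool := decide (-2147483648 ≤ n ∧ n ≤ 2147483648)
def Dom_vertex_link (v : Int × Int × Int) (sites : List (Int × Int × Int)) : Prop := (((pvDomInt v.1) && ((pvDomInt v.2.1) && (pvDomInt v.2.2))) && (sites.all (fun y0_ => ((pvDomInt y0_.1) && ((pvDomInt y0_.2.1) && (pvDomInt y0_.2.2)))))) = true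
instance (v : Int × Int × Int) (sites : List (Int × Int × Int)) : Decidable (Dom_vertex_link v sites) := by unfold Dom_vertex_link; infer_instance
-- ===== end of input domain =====

-- B reuses the accepted-edge set to decide triangles (index loops + edge-table lookups) instead of recomputing dot products and pairwise corners; alternative decomposition, same results.


-- ===== PORT A =====
-- axis_dirs, the fixed list of the six axis directions
def pvAxisDirs : List (Int × Int × Int) :=
  [(1,0,0), (-1,0,0), (0,1,0), (0,-1,0), (0,0,1), (0,0,-1)]

-- sum(d1[k] * d2[k] for k in range(3))
def pvDot (a b : Int × Int × Int) : Int := a.1 * b.1 + a.2.1 * b.2.1 + a.2.2 * b.2.2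

def vertex_link (v : Int × Int × Int) (sites : List (Int × Int × Int)) :
    (List (Int × Int × Int)) × (List (Int × Int)) × (List (Int × Int × Int)) :=
  let x := v.1
  let y := v.2.1
  let z := v.2.2
  let linkVerts := pvAxisDirs.filter (fun d => sites.contains (x + d.1, y + d.2.1, z + d.2.2))
  let linkEdges :=
    (PySem.List.enumerate linkVerts).foldl (fun acc p =>
      (PySem.List.enumerate linkVerts).foldl (fun acc2 q =>
        if q.1 ≤ p.1 then acc2
        else if pvDot p.2 q.2 ≠ 0 then acc2
        else if sites.contains (x + p.2.1 + q.2.1, y + p.2.2.1 + q.2.2.1, z + p.2.2.2 + q.2.2.2) then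
          acc2 ++ [(p.1, q.1)]
        else acc2) acc) []
  let linkTris :=
    (PySem.List.enumerate linkVerts).foldl (fun acc p =>
      (PySem.List.enumerate linkVerts).foldl (fun acc2 q =>
        if q.1 ≤ p.1 then acc2
        else
          (PySem.List.enumerate linkVerts).foldl (fun acc3 r =>
            if r.1 ≤ q.1 then acc3
            else
              let dot12 := pvDot p.2 q.2
              let dot13 := pvDot p.2 r.2
              let dot23 := pvDot q.2 r.2
              if dot12 ≠ 0 ∨ dot13 ≠ 0 ∨ dot23 ≠ 0 then acc3
              else if ([(x + p.2.1, y + p.2.2.1, z + p.2.2.2),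
                        (x + q.2.1, y + q.2.2.1, z + q.2.2.2),
                        (x + r.2.1, y + r.2.2.1, z + r.2.2.2),
                        (x + p.2.1 + q.2.1, y + p.2.2.1 + q.2.2.1, z + p.2.2.2 + q.2.2.2),
                        (x + p.2.1 + r.2.1, y + p.2.2.1 + r.2.2.1, z + p.2.2.2 + r.2.2.2),
                        (x + q.2.1 + r.2.1, y + q.2.2.1 + r.2.2.1, z + q.2.2.2 + r.2.2.2),
                        (x + p.2.1 + q.2.1 + r.2.1, y + p.2.2.1 + q.2.2.1 + r.2.2.1,
                         z + p.2.2.2 + q.2.2.2 + r.2.2.2)] : List (Int × Int × Int)).all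
                       (fun pt => sites.contains pt) then
                acc3 ++ [(p.1, q.1, r.1)]
              else acc3) acc2) acc) []
  (linkVerts, linkEdges, linkTris)

-- ===== PORT B =====
def vertex_link_alt (v : Int × Int × Int) (sites : List (Int × Int × Int)) :
    (List (Int × Int × Int)) × (List (Int × Int)) × (List (Int × Int × Int)) :=
  let x := v.1
  let y := v.2.1
  let z := v.2.2
  let linkVerts := pvAxisDirs.filter (fun d => sites.contains (x + d.1, y + d.2.1, z + d.2.2))
  let n : Int := linkVerts.length
  let linkEdges :=
    (PySem.List.pyRange 0 n).foldl (fun acc i =>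
      let d1 := PySem.List.pyGetD linkVerts i (0, 0, 0)
      (PySem.List.pyRange (i + 1) n).foldl (fun acc2 j =>
        let d2 := PySem.List.pyGetD linkVerts j (0, 0, 0)
        if pvDot d1 d2 == 0 &&
           sites.contains (x + d1.1 + d2.1, y + d1.2.1 + d2.2.1, z + d1.2.2 + d2.2.2) then
          acc2 ++ [(i, j)]
        else acc2) acc) []
  let E : PySem.Set (Int × Int) := PySem.Set.ofList linkEdges
  let linkTris :=
    (PySem.List.pyRange 0 n).foldl (fun acc i =>
      (PySem.List.pyRange (i + 1) n).foldl (fun acc2 j =>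
        if !(PySem.Set.contains E (i, j)) then acc2
        else
          (PySem.List.pyRange (j + 1) n).foldl (fun acc3 k =>
            let di := PySem.List.pyGetD linkVerts i (0, 0, 0)
            let dj := PySem.List.pyGetD linkVerts j (0, 0, 0)
            let dk := PySem.List.pyGetD linkVerts k (0, 0, 0)
            if PySem.Set.contains E (i, k) && PySem.Set.contains E (j, k) &&
               sites.contains (x + di.1 + dj.1 + dk.1, y + di.2.1 + dj.2.1 + dk.2.1,
                               z + di.2.2 + dj.2.2 + dk.2.2) then
              acc3 ++ [(i, j, k)]
            else acc3) acc2) acc) []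
  (linkVerts, linkEdges, linkTris)

-- ===== PRECONDITION & SPEC =====
def Spec_vertex_link (v : Int × Int × Int) (sites : List (Int × Int × Int)) (out : (List (Int × Int × Int)) × (List (Int × Int)) × (List (Int × Int × Int))) : Prop := out = vertex_link_alt v sites
instance (v : Int × Int × Int) (sites : List (Int × Int × Int)) (out : (List (Int × Int × Int)) × (List (Int × Int)) × (List (Int × Int × Int))) : Decidable (Spec_vertex_link v sites out) := by unfold Spec_vertex_link; infer_instance

-- ===== CLAIM (what is proved, stated in full; the proofs are below) =====
def Claim_equal_vertex_link : Prop := ∀ (v : Int × Int × Int) (sites : List (Int × Int × Int)), Dom_vertex_link v sites → Spec_vertex_link v sites (vertex_link v sites)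

-- ===== LEMMAS AND PROOFS =====

-- the components of the two ports, as standalone functions of the vertex coordinates,
-- the site list and the link-vertex list L (copied verbatim from the port bodies)
def pvEdgesA (x y z : Int) (sites : List (Int × Int × Int)) (L : List (Int × Int × Int)) :
    List (Int × Int) :=
  (PySem.List.enumerate L).foldl (fun acc p =>
    (PySem.List.enumerate L).foldl (fun acc2 q =>
      if q.1 ≤ p.1 then acc2
      else if pvDot p.2 q.2 ≠ 0 then acc2
      else if sites.contains (x + p.2.1 + q.2.1, y + p.2.2.1 + q.2.2.1, z + p.2.2.2 + q.2.2.2) then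
        acc2 ++ [(p.1, q.1)]
      else acc2) acc) []

def pvTrisA (x y z : Int) (sites : List (Int × Int × Int)) (L : List (Int × Int × Int)) :
    List (Int × Int × Int) :=
  (PySem.List.enumerate L).foldl (fun acc p =>
    (PySem.List.enumerate L).foldl (fun acc2 q =>
      if q.1 ≤ p.1 then acc2
      else
        (PySem.List.enumerate L).foldl (fun acc3 r =>
          if r.1 ≤ q.1 then acc3
          else
            let dot12 := pvDot p.2 q.2
            let dot13 := pvDot p.2 r.2
            let dot23 := pvDot q.2 r.2
            if dot12 ≠ 0 ∨ dot13 ≠ 0 ∨ dot23 ≠ 0 then acc3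
            else if ([(x + p.2.1, y + p.2.2.1, z + p.2.2.2),
                      (x + q.2.1, y + q.2.2.1, z + q.2.2.2),
                      (x + r.2.1, y + r.2.2.1, z + r.2.2.2),
                      (x + p.2.1 + q.2.1, y + p.2.2.1 + q.2.2.1, z + p.2.2.2 + q.2.2.2),
                      (x + p.2.1 + r.2.1, y + p.2.2.1 + r.2.2.1, z + p.2.2.2 + r.2.2.2),
                      (x + q.2.1 + r.2.1, y + q.2.2.1 + r.2.2.1, z + q.2.2.2 + r.2.2.2),
                      (x + p.2.1 + q.2.1 + r.2.1, y + p.2.2.1 + q.2.2.1 + r.2.2.1,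
                       z + p.2.2.2 + q.2.2.2 + r.2.2.2)] : List (Int × Int × Int)).all
                     (fun pt => sites.contains pt) then
              acc3 ++ [(p.1, q.1, r.1)]
            else acc3) acc2) acc) []

def pvEdgesB (x y z : Int) (sites : List (Int × Int × Int)) (L : List (Int × Int × Int)) :
    List (Int × Int) :=
  (PySem.List.pyRange 0 (L.length : Int)).foldl (fun acc i =>
    let d1 := PySem.List.pyGetD L i (0, 0, 0)
    (PySem.List.pyRange (i + 1) (L.length : Int)).foldl (fun acc2 j =>
      let d2 := PySem.List.pyGetD L j (0, 0, 0)
      if pvDot d1 d2 == 0 &&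
         sites.contains (x + d1.1 + d2.1, y + d1.2.1 + d2.2.1, z + d1.2.2 + d2.2.2) then
        acc2 ++ [(i, j)]
      else acc2) acc) []

def pvTrisB (x y z : Int) (sites : List (Int × Int × Int)) (L : List (Int × Int × Int)) :
    List (Int × Int × Int) :=
  let E : PySem.Set (Int × Int) := PySem.Set.ofList (pvEdgesB x y z sites L)
  (PySem.List.pyRange 0 (L.length : Int)).foldl (fun acc i =>
    (PySem.List.pyRange (i + 1) (L.length : Int)).foldl (fun acc2 j =>
      if !(PySem.Set.contains E (i, j)) then acc2
      else
        (PySem.List.pyRange (j + 1) (L.length : Int)).foldl (fun acc3 k =>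
          let di := PySem.List.pyGetD L i (0, 0, 0)
          let dj := PySem.List.pyGetD L j (0, 0, 0)
          let dk := PySem.List.pyGetD L k (0, 0, 0)
          if PySem.Set.contains E (i, k) && PySem.Set.contains E (j, k) &&
             sites.contains (x + di.1 + dj.1 + dk.1, y + di.2.1 + dj.2.1 + dk.2.1,
                             z + di.2.2 + dj.2.2 + dk.2.2) then
            acc3 ++ [(i, j, k)]
          else acc3) acc2) acc) []

-- a fold over range(0, n) whose body skips j ≤ i is a fold over range(i+1, n)
lemma pv_foldl_guard {β : Type} (n i : Int) (g : β → Int → β) (init : β) (hi : 0 ≤ i) :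
    (PySem.List.pyRange 0 n).foldl (fun acc j => if j ≤ i then acc else g acc j) init
      = (PySem.List.pyRange (i + 1) n).foldl g init := by
  by_cases h : i + 1 ≤ n
  · rw [PySem.List.pyRange_one_append 0 (i + 1) n (by omega) h, List.foldl_append]
    rw [PySem.List.foldl_congr_mem _ _ (fun acc _ => acc) init
        (by intro acc j hj; rw [PySem.List.mem_pyRange_one] at hj; rw [if_pos (by omega)]),
      PySem.List.foldl_ignore]
    exact PySem.List.foldl_congr_mem _ _ g init
      (by intro acc j hj; rw [PySem.List.mem_pyRange_one] at hj; rw [if_neg (by omega)])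
  · rw [PySem.List.foldl_congr_mem _ _ (fun acc _ => acc) init
        (by intro acc j hj; rw [PySem.List.mem_pyRange_one] at hj; rw [if_pos (by omega)]),
      PySem.List.foldl_ignore,
      PySem.List.pyRange_one_eq_nil (a := i + 1) (b := n) (by omega)]
    rfl

lemma pvEdgesA_eq (x y z : Int) (sites L : List (Int × Int × Int)) :
    pvEdgesA x y z sites L = pvEdgesB x y z sites L := by
  unfold pvEdgesA pvEdgesB
  rw [PySem.List.enumerate_eq_map_pyRange L (0, 0, 0)]
  simp only [List.foldl_map, PySem.List.len]
  apply PySem.List.foldl_congr_mem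
  intro acc i hi
  rw [PySem.List.mem_pyRange_one] at hi
  rw [pv_foldl_guard _ _ _ _ hi.1]
  apply PySem.List.foldl_congr_mem
  intro acc2 j hj
  simp [ite_not, ← ite_and]

lemma pv_mem_edgesB (x y z : Int) (sites L : List (Int × Int × Int)) (a b : Int) :
    (a, b) ∈ pvEdgesB x y z sites L ↔
      0 ≤ a ∧ a + 1 ≤ b ∧ b < (L.length : Int) ∧
      pvDot (PySem.List.pyGetD L a (0, 0, 0)) (PySem.List.pyGetD L b (0, 0, 0)) = 0 ∧
      sites.contains
        (x + (PySem.List.pyGetD L a (0, 0, 0)).1 + (PySem.List.pyGetD L b (0, 0, 0)).1,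
         y + (PySem.List.pyGetD L a (0, 0, 0)).2.1 + (PySem.List.pyGetD L b (0, 0, 0)).2.1,
         z + (PySem.List.pyGetD L a (0, 0, 0)).2.2 + (PySem.List.pyGetD L b (0, 0, 0)).2.2) = true := by
  unfold pvEdgesB
  rw [PySem.List.foldl_congr_mem _ _
      (fun acc i => acc ++
        ((PySem.List.pyRange (i + 1) (L.length : Int)).filter (fun j =>
            pvDot (PySem.List.pyGetD L i (0, 0, 0)) (PySem.List.pyGetD L j (0, 0, 0)) == 0 &&
            sites.contains
              (x + (PySem.List.pyGetD L i (0, 0, 0)).1 + (PySem.List.pyGetD L j (0, 0, 0)).1,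
               y + (PySem.List.pyGetD L i (0, 0, 0)).2.1 + (PySem.List.pyGetD L j (0, 0, 0)).2.1,
               z + (PySem.List.pyGetD L i (0, 0, 0)).2.2 + (PySem.List.pyGetD L j (0, 0, 0)).2.2))).map
          (fun j => (i, j))) []
      (by intro acc i _; exact PySem.List.foldl_append_if _ _ _ _),
    PySem.List.foldl_append_eq_flatMap]
  simp only [List.nil_append, List.mem_flatMap, List.mem_map, List.mem_filter,
    PySem.List.mem_pyRange_one, Bool.and_eq_true, beq_iff_eq, Prod.mk.injEq]
  constructor
  · rintro ⟨i, ⟨hi0, _⟩, j, ⟨⟨hj1, hj2⟩, hd, hc⟩, rfl, rfl⟩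
    exact ⟨hi0, hj1, hj2, hd, hc⟩
  · rintro ⟨ha0, hb1, hb2, hd, hc⟩
    exact ⟨a, ⟨ha0, by omega⟩, b, ⟨⟨hb1, hb2⟩, hd, hc⟩, rfl, rfl⟩

lemma pvTrisA_eq (x y z : Int) (sites L : List (Int × Int × Int))
    (hmem : ∀ d ∈ L, sites.contains (x + d.1, y + d.2.1, z + d.2.2) = true) :
    pvTrisA x y z sites L = pvTrisB x y z sites L := by
  unfold pvTrisA pvTrisB
  rw [PySem.List.enumerate_eq_map_pyRange L (0, 0, 0)]
  simp only [List.foldl_map, PySem.List.len]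
  apply PySem.List.foldl_congr_mem
  intro acc i hi
  rw [PySem.List.mem_pyRange_one] at hi
  rw [pv_foldl_guard _ _ _ _ hi.1]
  apply PySem.List.foldl_congr_mem
  intro acc2 j hj
  rw [PySem.List.mem_pyRange_one] at hj
  rw [pv_foldl_guard _ _ _ _ (by omega : (0:Int) ≤ j)]
  have hPi : PySem.List.pyGetD L i (0, 0, 0) ∈ L := by
    rw [PySem.List.pyGetD_eq_getElem L (0, 0, 0) hi.1 hi.2]; exact List.getElem_mem _
  have hPj : PySem.List.pyGetD L j (0, 0, 0) ∈ L := by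
    rw [PySem.List.pyGetD_eq_getElem L (0, 0, 0) (by omega) hj.2]; exact List.getElem_mem _
  by_cases hij : PySem.Set.contains (PySem.Set.ofList (pvEdgesB x y z sites L)) (i, j) = true
  · have h12 := (PySem.Set.contains_iff _ _).mp hij
    rw [PySem.Set.mem_ofList, pv_mem_edgesB] at h12
    obtain ⟨-, -, -, h12d, h12c⟩ := h12
    simp only [hij, Bool.not_true, Bool.false_eq_true, if_false]
    apply PySem.List.foldl_congr_mem
    intro acc3 k hk
    rw [PySem.List.mem_pyRange_one] at hk
    have hPk : PySem.List.pyGetD L k (0, 0, 0) ∈ L := by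
      rw [PySem.List.pyGetD_eq_getElem L (0, 0, 0) (by omega) hk.2]; exact List.getElem_mem _
    have e13 : (i, k) ∈ pvEdgesB x y z sites L ↔
        (pvDot (PySem.List.pyGetD L i (0, 0, 0)) (PySem.List.pyGetD L k (0, 0, 0)) = 0 ∧
         (x + (PySem.List.pyGetD L i (0, 0, 0)).1 + (PySem.List.pyGetD L k (0, 0, 0)).1,
          y + (PySem.List.pyGetD L i (0, 0, 0)).2.1 + (PySem.List.pyGetD L k (0, 0, 0)).2.1,
          z + (PySem.List.pyGetD L i (0, 0, 0)).2.2 + (PySem.List.pyGetD L k (0, 0, 0)).2.2) ∈ sites) := by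
      rw [pv_mem_edgesB]
      constructor
      · rintro ⟨-, -, -, hd, hc⟩; exact ⟨hd, List.contains_iff_mem.mp hc⟩
      · rintro ⟨hd, hc⟩; exact ⟨hi.1, by omega, hk.2, hd, List.contains_iff_mem.mpr hc⟩
    have e23 : (j, k) ∈ pvEdgesB x y z sites L ↔
        (pvDot (PySem.List.pyGetD L j (0, 0, 0)) (PySem.List.pyGetD L k (0, 0, 0)) = 0 ∧
         (x + (PySem.List.pyGetD L j (0, 0, 0)).1 + (PySem.List.pyGetD L k (0, 0, 0)).1,
          y + (PySem.List.pyGetD L j (0, 0, 0)).2.1 + (PySem.List.pyGetD L k (0, 0, 0)).2.1,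
          z + (PySem.List.pyGetD L j (0, 0, 0)).2.2 + (PySem.List.pyGetD L k (0, 0, 0)).2.2) ∈ sites) := by
      rw [pv_mem_edgesB]
      constructor
      · rintro ⟨-, -, -, hd, hc⟩; exact ⟨hd, List.contains_iff_mem.mp hc⟩
      · rintro ⟨hd, hc⟩; exact ⟨by omega, hk.1, hk.2, hd, List.contains_iff_mem.mpr hc⟩
    have m1 := List.contains_iff_mem.mp (hmem _ hPi)
    have m2 := List.contains_iff_mem.mp (hmem _ hPj)
    have m3 := List.contains_iff_mem.mp (hmem _ hPk)
    have c12 := List.contains_iff_mem.mp h12c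
    by_cases h13 : pvDot (PySem.List.pyGetD L i (0, 0, 0)) (PySem.List.pyGetD L k (0, 0, 0)) = 0 <;>
      by_cases h23 : pvDot (PySem.List.pyGetD L j (0, 0, 0)) (PySem.List.pyGetD L k (0, 0, 0)) = 0 <;>
      by_cases hc13 : (x + (PySem.List.pyGetD L i (0, 0, 0)).1 + (PySem.List.pyGetD L k (0, 0, 0)).1,
          y + (PySem.List.pyGetD L i (0, 0, 0)).2.1 + (PySem.List.pyGetD L k (0, 0, 0)).2.1,
          z + (PySem.List.pyGetD L i (0, 0, 0)).2.2 + (PySem.List.pyGetD L k (0, 0, 0)).2.2) ∈ sites <;>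
      by_cases hc23 : (x + (PySem.List.pyGetD L j (0, 0, 0)).1 + (PySem.List.pyGetD L k (0, 0, 0)).1,
          y + (PySem.List.pyGetD L j (0, 0, 0)).2.1 + (PySem.List.pyGetD L k (0, 0, 0)).2.1,
          z + (PySem.List.pyGetD L j (0, 0, 0)).2.2 + (PySem.List.pyGetD L k (0, 0, 0)).2.2) ∈ sites <;>
      simp [e13, e23, h12d, h13, h23, hc13, hc23, m1, m2, m3, c12]
  · have hijf : PySem.Set.contains (PySem.Set.ofList (pvEdgesB x y z sites L)) (i, j) = false :=
      Bool.eq_false_iff.mpr hij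
    simp only [hijf, Bool.not_false, if_true]
    rw [PySem.List.foldl_congr_mem _ _ (fun acc _ => acc) acc2 ?_, PySem.List.foldl_ignore]
    intro acc3 k hk
    rw [PySem.List.mem_pyRange_one] at hk
    have h12 : ¬ (pvDot (PySem.List.pyGetD L i (0, 0, 0)) (PySem.List.pyGetD L j (0, 0, 0)) = 0 ∧
        (x + (PySem.List.pyGetD L i (0, 0, 0)).1 + (PySem.List.pyGetD L j (0, 0, 0)).1,
         y + (PySem.List.pyGetD L i (0, 0, 0)).2.1 + (PySem.List.pyGetD L j (0, 0, 0)).2.1,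
         z + (PySem.List.pyGetD L i (0, 0, 0)).2.2 + (PySem.List.pyGetD L j (0, 0, 0)).2.2) ∈ sites) := by
      intro ⟨hd, hc⟩
      apply hij
      rw [PySem.Set.contains_iff, PySem.Set.mem_ofList, pv_mem_edgesB]
      exact ⟨hi.1, hj.1, hj.2, hd, List.contains_iff_mem.mpr hc⟩
    by_cases hd12 : pvDot (PySem.List.pyGetD L i (0, 0, 0)) (PySem.List.pyGetD L j (0, 0, 0)) = 0
    · have hc12 : (x + (PySem.List.pyGetD L i (0, 0, 0)).1 + (PySem.List.pyGetD L j (0, 0, 0)).1,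
          y + (PySem.List.pyGetD L i (0, 0, 0)).2.1 + (PySem.List.pyGetD L j (0, 0, 0)).2.1,
          z + (PySem.List.pyGetD L i (0, 0, 0)).2.2 + (PySem.List.pyGetD L j (0, 0, 0)).2.2) ∉ sites :=
        fun h => h12 ⟨hd12, h⟩
      simp [hd12, hc12]
    · simp [hd12]

lemma pv_main (v : Int × Int × Int) (sites : List (Int × Int × Int)) :
    vertex_link v sites = vertex_link_alt v sites := by
  have hA : vertex_link v sites =
      (pvAxisDirs.filter (fun d => sites.contains (v.1 + d.1, v.2.1 + d.2.1, v.2.2 + d.2.2)),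
       pvEdgesA v.1 v.2.1 v.2.2 sites
         (pvAxisDirs.filter (fun d => sites.contains (v.1 + d.1, v.2.1 + d.2.1, v.2.2 + d.2.2))),
       pvTrisA v.1 v.2.1 v.2.2 sites
         (pvAxisDirs.filter (fun d => sites.contains (v.1 + d.1, v.2.1 + d.2.1, v.2.2 + d.2.2)))) := rfl
  have hB : vertex_link_alt v sites =
      (pvAxisDirs.filter (fun d => sites.contains (v.1 + d.1, v.2.1 + d.2.1, v.2.2 + d.2.2)),
       pvEdgesB v.1 v.2.1 v.2.2 sites
         (pvAxisDirs.filter (fun d => sites.contains (v.1 + d.1, v.2.1 + d.2.1, v.2.2 + d.2.2))),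
       pvTrisB v.1 v.2.1 v.2.2 sites
         (pvAxisDirs.filter (fun d => sites.contains (v.1 + d.1, v.2.1 + d.2.1, v.2.2 + d.2.2)))) := rfl
  rw [hA, hB, pvEdgesA_eq,
    pvTrisA_eq v.1 v.2.1 v.2.2 sites _ (fun d hd => (List.mem_filter.mp hd).2)]

-- ===== VERDICT (by name: the statement is the Claim_ definition above) =====
theorem vertex_link_spec : Claim_equal_vertex_link := by
  intro v sites _
  unfold Spec_vertex_link
  exact pv_main v sites
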